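-- pv_equiv track=rewrite | github.com/Ionic/osc | osc/cmdln.py | _get_trailing_whitespace
-- ===== SOURCE A (Python) =====
-- def _get_trailing_whitespace(marker, s):
--     """Return the whitespace content trailing the given 'marker' in string 's',
--     up to and including a newline.
--     """
--     suffix = ''
--     start = s.index(marker) + len(marker)
--     i = start
--     while i < len(s):
--         if s[i] in ' \t':
--             suffix += s[i]
--         elif s[i] in '\r\n':
--             suffix += s[i]
--             if s[i] == '\r' and i+1 < len(s) and s[i+1] == '\n':
--                 suffix += s[i+1]
--             break
--         else:
--             break
--         i += 1
--     return suffix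
-- ===== SOURCE B (Python) =====
-- def _get_trailing_whitespace(marker, s):
--     start = s.index(marker) + len(marker)
--     rest = s[start:]
--     stripped = rest.lstrip(' \t')
--     ws = rest[:len(rest) - len(stripped)]
--     if stripped.startswith('\r\n'):
--         return ws + '\r\n'
--     if stripped[:1] in ('\r', '\n'):
--         return ws + stripped[0]
--     return ws
-- ===== Notes on version B (the rewrite author's own statement) =====
-- stated objective: simpler
-- what changed: Replaces A's stateful char-by-char while-loop (with index arithmetic and one-char lookahead) by a declarative strip-then-classify: lstrip(' \t') gives the space/tab run at once, then a single startswith/lookahead decides which line terminator (if any) to append.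
import Mathlib
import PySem

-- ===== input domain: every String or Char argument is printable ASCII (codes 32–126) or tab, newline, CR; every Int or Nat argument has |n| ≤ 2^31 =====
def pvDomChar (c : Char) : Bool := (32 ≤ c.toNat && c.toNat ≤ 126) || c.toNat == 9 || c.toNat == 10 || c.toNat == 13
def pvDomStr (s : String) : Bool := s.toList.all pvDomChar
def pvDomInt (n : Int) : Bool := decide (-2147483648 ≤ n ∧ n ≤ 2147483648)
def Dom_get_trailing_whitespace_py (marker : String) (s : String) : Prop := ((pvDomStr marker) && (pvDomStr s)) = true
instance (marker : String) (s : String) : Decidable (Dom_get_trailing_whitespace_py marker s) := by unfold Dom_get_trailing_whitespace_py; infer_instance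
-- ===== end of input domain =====

-- B replaces A's stateful char-by-char while-loop with strip-then-classify (lstrip + one lookahead); objective: simpler, same cost.

-- ===== PORT A =====
-- the while-loop of A over the suffix after the marker, char by char with one-char lookahead
def pvLoopA : List Char → List Char
  | [] => []
  | c :: t =>
    if c = ' ' ∨ c = '\t' then c :: pvLoopA t
    else if c = '\r' ∨ c = '\n' then
      c :: (if c = '\r' ∧ t.head? = some '\n' then ['\n'] else [])
    else []

def get_trailing_whitespace_py (marker : String) (s : String) : String :=
  -- s.index(marker): under Pre_ the marker occurs, so find ≥ 0 and .toNat is exact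
  let start := (PySem.Str.find s marker).toNat + marker.length
  String.mk (pvLoopA (s.toList.drop start))

-- ===== PORT B =====
def get_trailing_whitespace_py_alt (marker : String) (s : String) : String :=
  let start := (PySem.Str.find s marker).toNat + marker.length
  let rest := s.toList.drop start
  let stripped := rest.dropWhile (fun c => c = ' ' ∨ c = '\t')   -- rest.lstrip(' \t')
  let ws := rest.take (rest.length - stripped.length)
  if stripped.take 2 = ['\r', '\n'] then String.mk (ws ++ ['\r', '\n'])
  else
    match stripped with
    | c :: _ => if c = '\r' ∨ c = '\n' then String.mk (ws ++ [c]) else String.mk ws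
    | [] => String.mk ws

-- ===== PRECONDITION & SPEC =====
-- Pre_ excludes exactly the inputs where marker does not occur in s: there s.index raises ValueError.
def Pre_get_trailing_whitespace_py (marker : String) (s : String) : Prop :=
  PySem.Str.isIn marker s = true
instance (marker : String) (s : String) : Decidable (Pre_get_trailing_whitespace_py marker s) := by
  unfold Pre_get_trailing_whitespace_py; infer_instance

def pvWitness_get_trailing_whitespace_py : String × String := ("::", "a:: \t\r\nrest")

def Spec_get_trailing_whitespace_py (marker : String) (s : String) (out : String) : Prop := out = get_trailing_whitespace_py_alt marker s
instance (marker : String) (s : String) (out : String) : Decidable (Spec_get_trailing_whitespace_py marker s out) := by unfold Spec_get_trailing_whitespace_py; infer_instance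

-- ===== CLAIM (what is proved, stated in full; the proofs are below) =====
def Claim_equal_get_trailing_whitespace_py : Prop := ∀ (marker : String) (s : String), Dom_get_trailing_whitespace_py marker s → Pre_get_trailing_whitespace_py marker s → Spec_get_trailing_whitespace_py marker s (get_trailing_whitespace_py marker s)

-- ===== LEMMAS AND PROOFS =====

-- B's strip-then-classify computes exactly what A's loop accumulates, on any char list
theorem pvLoopA_eq_alt (l : List Char) :
    pvLoopA l =
      (let stripped := l.dropWhile (fun c => c = ' ' ∨ c = '\t')
       let ws := l.take (l.length - stripped.length)
       if stripped.take 2 = ['\r', '\n'] then ws ++ ['\r', '\n']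
       else
         match stripped with
         | c :: _ => if c = '\r' ∨ c = '\n' then ws ++ [c] else ws
         | [] => ws) := by
  induction l with
  | nil => simp [pvLoopA]
  | cons c t ih =>
    by_cases hp : c = ' ' ∨ c = '\t'
    · have hd : (c :: t).dropWhile (fun c => decide (c = ' ' ∨ c = '\t'))
          = t.dropWhile (fun c => decide (c = ' ' ∨ c = '\t')) := by
        simp [hp]
      have hlen : (t.dropWhile (fun c => decide (c = ' ' ∨ c = '\t'))).length ≤ t.length :=
        List.length_dropWhile_le _ _
      simp only [pvLoopA, hp, if_true, ih, hd]
      have htake : List.take ((c :: t).length - (List.dropWhile (fun c => decide (c = ' ' ∨ c = '\t')) t).length) (c :: t)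
          = c :: List.take (t.length - (List.dropWhile (fun c => decide (c = ' ' ∨ c = '\t')) t).length) t := by
        have h1 : (c :: t).length - (List.dropWhile (fun c => decide (c = ' ' ∨ c = '\t')) t).length
            = (t.length - (List.dropWhile (fun c => decide (c = ' ' ∨ c = '\t')) t).length) + 1 := by
          simp only [List.length_cons]; omega
        rw [h1, List.take_succ_cons]
      rw [htake]
      cases hcase : List.dropWhile (fun c => decide (c = ' ' ∨ c = '\t')) t with
      | nil => simp only [hcase]; simp
      | cons d u => simp only [hcase]; split_ifs <;> simp
    · have hd : (c :: t).dropWhile (fun c => decide (c = ' ' ∨ c = '\t')) = c :: t := by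
        simp [hp]
      have hz : (c :: t).length - (c :: t).length = 0 := by omega
      simp only [pvLoopA, hp, if_false, hd, hz, List.take_zero, List.nil_append]
      by_cases hr : c = '\r'
      · subst hr
        cases t with
        | nil => simp [List.take]
        | cons d u =>
          by_cases hdn : d = '\n'
          · subst hdn; simp
          · simp [hdn]
      · by_cases hn' : c = '\n'
        · subst hn'; simp
        · have hno : ¬ (c = '\r' ∨ c = '\n') := by tauto
          simp [hno, hr]

-- ===== VERDICT (by name: the statement is the Claim_ definition above) =====
theorem get_trailing_whitespace_py_spec : Claim_equal_get_trailing_whitespace_py := by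
  intro marker s _ _
  unfold Spec_get_trailing_whitespace_py get_trailing_whitespace_py get_trailing_whitespace_py_alt
  simp only [pvLoopA_eq_alt]
  set l := s.toList.drop ((PySem.Str.find s marker).toNat + marker.length)
  cases l.dropWhile (fun c => c = ' ' ∨ c = '\t') with
  | nil => simp
  | cons d u => dsimp only; split_ifs <;> rfl
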